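-- pv_equiv track=rewrite | github.com/dododoyo/Competitive-Programming | 0000CodeForces/contests/Contest-08/A_Challenging_Valleys.py | is_valley
-- ===== SOURCE A (Python) =====
-- def is_valley(n,arr):
--     sub_arr="YES";
--     up=down=0
--     for i in range(1,n):
--         if arr[i] > arr[i-1]:up+=1
--         elif arr[i] < arr[i-1]:
--             down+=1;
--             if up > 0:sub_arr="NO";break
--     return sub_arr
-- ===== SOURCE B (Python) =====
-- def is_valley(n, arr):
--     i = 1
--     while i < n and arr[i] <= arr[i - 1]:
--         i += 1
--     while i < n and arr[i] >= arr[i - 1]: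
--         i += 1
--     return "YES" if i >= n else "NO"
-- ===== Notes on version B (the rewrite author's own statement) =====
-- stated objective: simpler
-- what changed: Replaces the flag/counter loop (up/down counters with an early break) by a two-phase index walk: skip the non-increasing prefix, then the non-decreasing tail, and answer YES iff the walk consumed all of range(1,n).
import Mathlib
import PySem

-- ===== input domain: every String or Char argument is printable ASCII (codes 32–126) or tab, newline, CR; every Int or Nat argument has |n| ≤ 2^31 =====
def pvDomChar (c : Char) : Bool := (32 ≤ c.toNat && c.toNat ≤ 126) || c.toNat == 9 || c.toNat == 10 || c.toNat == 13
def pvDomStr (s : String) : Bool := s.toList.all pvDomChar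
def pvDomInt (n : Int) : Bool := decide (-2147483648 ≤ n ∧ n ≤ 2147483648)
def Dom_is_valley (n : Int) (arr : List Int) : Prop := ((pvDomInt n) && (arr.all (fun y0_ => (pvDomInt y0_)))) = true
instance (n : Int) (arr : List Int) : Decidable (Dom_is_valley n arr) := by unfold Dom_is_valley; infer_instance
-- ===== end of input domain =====

-- A's up/down-flag loop vs B's two-phase monotone index walk; equal return value on every
-- input where A returns normally (Pre_ excludes exactly the inputs where both raise IndexError).


-- ===== PORT A =====
-- the for-loop of A over range(1,n), state (sub_arr, up, down); the fuel argument counts the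
-- remaining iterations (totality guard only: fuel = (n - i).toNat throughout); break returns
-- "NO" immediately
def isValleyLoopA (arr : List Int) : Nat → Int → String → Int → Int → String
  | 0, _, subArr, _, _ => subArr
  | fuel + 1, i, subArr, up, down =>
    if (PySem.List.pyGetD arr i 0) > (PySem.List.pyGetD arr (i - 1) 0) then
      isValleyLoopA arr fuel (i + 1) subArr (up + 1) down
    else if (PySem.List.pyGetD arr i 0) < (PySem.List.pyGetD arr (i - 1) 0) then
      if up > 0 then "NO"
      else isValleyLoopA arr fuel (i + 1) subArr up (down + 1)
    else isValleyLoopA arr fuel (i + 1) subArr up down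

def is_valley (n : Int) (arr : List Int) : String :=
  isValleyLoopA arr (n - 1).toNat 1 "YES" 0 0

-- ===== PORT B =====
-- first while loop: walk the non-increasing prefix (fuel = (n - i).toNat encodes 'i < n')
def walkDown (arr : List Int) : Nat → Int → Int
  | 0, i => i
  | fuel + 1, i =>
    if (PySem.List.pyGetD arr i 0) ≤ (PySem.List.pyGetD arr (i - 1) 0) then
      walkDown arr fuel (i + 1)
    else i

-- second while loop: walk the non-decreasing tail
def walkUp (arr : List Int) : Nat → Int → Int
  | 0, i => i
  | fuel + 1, i =>
    if (PySem.List.pyGetD arr i 0) ≥ (PySem.List.pyGetD arr (i - 1) 0) then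
      walkUp arr fuel (i + 1)
    else i

def is_valley_alt (n : Int) (arr : List Int) : String :=
  let i := walkDown arr (n - 1).toNat 1
  let j := walkUp arr (n - i).toNat i
  if j ≥ n then "YES" else "NO"

-- ===== PRECONDITION & SPEC =====
-- Pre_ holds exactly where Python A returns normally: either every index range(1,n) can touch is
-- in bounds (n ≤ len(arr)), or the loop body never runs (n ≤ 1), or the loop breaks inside the
-- array (a strict decrease at some in-bounds index preceded by a strict increase); otherwise A
-- raises IndexError (and Python B raises there too).
def Pre_is_valley (n : Int) (arr : List Int) : Prop :=
  n ≤ arr.length ∨ n ≤ 1 ∨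
    ∃ i ∈ List.range arr.length, ∃ j ∈ List.range i, 1 ≤ j ∧
      arr.getD i 0 < arr.getD (i - 1) 0 ∧ arr.getD j 0 > arr.getD (j - 1) 0
instance (n : Int) (arr : List Int) : Decidable (Pre_is_valley n arr) := by
  unfold Pre_is_valley; infer_instance

def pvWitness_is_valley : Int × List Int := (4, [3, 1, 2, 5])

def Spec_is_valley (n : Int) (arr : List Int) (out : String) : Prop := out = is_valley_alt n arr
instance (n : Int) (arr : List Int) (out : String) : Decidable (Spec_is_valley n arr out) := by
  unfold Spec_is_valley; infer_instance

-- ===== CLAIM (what is proved, stated in full; the proofs are below) =====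
def Claim_equal_is_valley : Prop := ∀ (n : Int) (arr : List Int), Dom_is_valley n arr → Pre_is_valley n arr → Spec_is_valley n arr (is_valley n arr)

-- ===== LEMMAS AND PROOFS =====

-- Phase-two invariant: once some strict increase has been seen (up > 0), A's remaining loop
-- returns "YES" iff B's second while loop consumes the rest of range(i, n).
theorem loopA_eq_walkUp (n : Int) (arr : List Int) (fuel : Nat) :
    ∀ (i up down : Int), up > 0 → (n - i).toNat = fuel →
      isValleyLoopA arr fuel i "YES" up down
        = (if walkUp arr fuel i ≥ n then "YES" else "NO") := by
  induction fuel with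
  | zero =>
    intro i up down _ hf
    rw [isValleyLoopA, walkUp, if_pos (by omega)]
  | succ fuel ih =>
    intro i up down hup hf
    rw [isValleyLoopA]
    by_cases hgt : (PySem.List.pyGetD arr i 0) > (PySem.List.pyGetD arr (i - 1) 0)
    · have hw : walkUp arr (fuel + 1) i = walkUp arr fuel (i + 1) := by
        rw [walkUp, if_pos (le_of_lt hgt)]
      rw [if_pos hgt, hw]
      exact ih (i + 1) (up + 1) down (by omega) (by omega)
    · by_cases hlt : (PySem.List.pyGetD arr i 0) < (PySem.List.pyGetD arr (i - 1) 0)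
      · have hw : walkUp arr (fuel + 1) i = i := by
          rw [walkUp, if_neg (by omega)]
        rw [if_neg hgt, if_pos hlt, if_pos hup, hw, if_neg (by omega)]
      · have hw : walkUp arr (fuel + 1) i = walkUp arr fuel (i + 1) := by
          rw [walkUp, if_pos (by omega)]
        rw [if_neg hgt, if_neg hlt, hw]
        exact ih (i + 1) up down hup (by omega)

-- Phase-one invariant: while up = 0, A's loop from index i equals B's two walks from i.
theorem loopA_eq_walks (n : Int) (arr : List Int) (fuel : Nat) :
    ∀ (i down : Int), (n - i).toNat = fuel →
      isValleyLoopA arr fuel i "YES" 0 down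
        = (if walkUp arr (n - walkDown arr fuel i).toNat (walkDown arr fuel i) ≥ n
           then "YES" else "NO") := by
  induction fuel with
  | zero =>
    intro i down hf
    rw [isValleyLoopA, walkDown, hf, walkUp, if_pos (by omega)]
  | succ fuel ih =>
    intro i down hf
    rw [isValleyLoopA]
    by_cases hgt : (PySem.List.pyGetD arr i 0) > (PySem.List.pyGetD arr (i - 1) 0)
    · -- B's first walk stops at i; its second walk steps through the strict increase at i
      have hd : walkDown arr (fuel + 1) i = i := by
        rw [walkDown, if_neg (by omega)]
      have hw : walkUp arr (n - i).toNat i = walkUp arr fuel (i + 1) := by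
        rw [hf, walkUp, if_pos (le_of_lt hgt)]
      rw [if_pos hgt, hd, hw]
      exact loopA_eq_walkUp n arr fuel (i + 1) (0 + 1) down (by omega) (by omega)
    · by_cases hlt : (PySem.List.pyGetD arr i 0) < (PySem.List.pyGetD arr (i - 1) 0)
      · have hd : walkDown arr (fuel + 1) i = walkDown arr fuel (i + 1) := by
          rw [walkDown, if_pos (le_of_lt hlt)]
        rw [if_neg hgt, if_pos hlt, if_neg (show ¬(0:Int) > 0 by omega), hd]
        exact ih (i + 1) (down + 1) (by omega)
      · have hd : walkDown arr (fuel + 1) i = walkDown arr fuel (i + 1) := by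
          rw [walkDown, if_pos (by omega)]
        rw [if_neg hgt, if_neg hlt, hd]
        exact ih (i + 1) down (by omega)

-- ===== VERDICT (by name: the statement is the Claim_ definition above) =====
theorem is_valley_spec : Claim_equal_is_valley := by
  intro n arr _ _
  unfold Spec_is_valley is_valley is_valley_alt
  exact loopA_eq_walks n arr (n - 1).toNat 1 0 rfl
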